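-- pv_equiv track=rewrite | github.com/Sihaowuuuu/Microfluidic- | semiauto/semiauto.py | find_reasonable_low_intensity_pixels
-- ===== SOURCE A (Python) =====
-- def find_reasonable_low_intensity_pixels(intensity_values, target_count, final_mean):
--     low_intensity_indices = []
--     distance_pattern = [16, 16]
--     pattern_index = 0
--
--     for i in range(len(intensity_values)):
--         if intensity_values[i] < final_mean:  # Intensity threshold
--             if not low_intensity_indices or (
--                 100 > i - low_intensity_indices[-1] > distance_pattern[pattern_index]
--             ):
--                 low_intensity_indices.append(i)
--                 pattern_index = (pattern_index + 1) % len(distance_pattern)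
--                 if len(low_intensity_indices) == target_count:
--                     break
--
--     return low_intensity_indices
-- ===== SOURCE B (Python) =====
-- def _first_greater(cands, lo, x):
--     # index of the first element of sorted cands at position >= lo that is > x
--     hi = len(cands)
--     while lo < hi:
--         mid = (lo + hi) // 2
--         if cands[mid] <= x:
--             lo = mid + 1
--         else:
--             hi = mid
--     return lo
--
--
-- def find_reasonable_low_intensity_pixels(intensity_values, target_count, final_mean):
--     candidates = [i for i, v in enumerate(intensity_values) if v < final_mean]
--     if not candidates:
--         return []
--     result = [candidates[0]]
--     pos = 0
--     while len(result) != target_count: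
--         # jump by binary search to the first candidate beyond the 16-gap,
--         # since candidates below result[-1] + 16 can never be selected
--         pos = _first_greater(candidates, pos + 1, result[-1] + 16)
--         if pos == len(candidates) or candidates[pos] - result[-1] >= 100:
--             # no candidate in the open window (last+16, last+100); later
--             # candidates are even farther, so nothing can ever be selected
--             break
--         result.append(candidates[pos])
--     return result
-- ===== Notes on version B (the rewrite author's own statement) =====
-- stated objective: alternative
-- what changed: B builds the sorted list of sub-threshold indices once, then instead of A's fused linear scan it repeatedly binary-searches that list for the first candidate beyond last+16 and terminates the whole loop as soon as the found candidate overshoots the 100 window (later candidates are farther still, so none can ever be selected), while A keeps scanning to the end.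
import Mathlib
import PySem

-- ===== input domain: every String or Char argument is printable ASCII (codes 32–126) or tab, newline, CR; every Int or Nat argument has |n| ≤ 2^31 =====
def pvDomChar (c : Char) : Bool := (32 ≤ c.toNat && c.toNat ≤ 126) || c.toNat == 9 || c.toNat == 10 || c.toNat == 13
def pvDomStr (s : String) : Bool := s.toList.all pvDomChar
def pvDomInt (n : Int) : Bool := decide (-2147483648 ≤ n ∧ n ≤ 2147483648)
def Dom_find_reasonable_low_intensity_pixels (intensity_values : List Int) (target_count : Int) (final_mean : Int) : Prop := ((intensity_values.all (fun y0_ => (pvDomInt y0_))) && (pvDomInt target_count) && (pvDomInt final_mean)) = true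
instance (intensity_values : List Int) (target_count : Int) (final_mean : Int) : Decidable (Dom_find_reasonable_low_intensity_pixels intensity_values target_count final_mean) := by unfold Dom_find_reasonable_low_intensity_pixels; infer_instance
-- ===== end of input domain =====

-- B replaces A's fused linear scan by: one filtering pass building the sorted candidate list,
-- then a jump loop that binary-searches for the first candidate beyond last+16 and terminates
-- outright once the window (last+16, last+100) is overshot (objective: alternative).


-- ===== PORT A =====
-- A's loop `for i in range(len(xs)): v = xs[i]; …` ported as structural recursion over the
-- enumerated list (i, xs[i]); `low_intensity_indices` kept reversed (append = cons, [-1] = head).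
def pvAgo (pending : List (Int × Int)) (target_count : Int) (final_mean : Int)
    (acc : List Int) (pattern_index : Nat) : List Int :=
  match pending with
  | [] => acc.reverse
  | (i, v) :: rest =>
    if v < final_mean then
      (match acc with
       | [] =>
         let acc' := i :: acc
         if ((acc'.length : Int) = target_count) then acc'.reverse
         else pvAgo rest target_count final_mean acc' ((pattern_index + 1) % 2)
       | last :: _ =>
         if 100 > i - last ∧ i - last > ([(16 : Int), 16].getD pattern_index 0) then
           let acc' := i :: acc
           if ((acc'.length : Int) = target_count) then acc'.reverse
           else pvAgo rest target_count final_mean acc' ((pattern_index + 1) % 2)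
         else pvAgo rest target_count final_mean acc pattern_index)
    else pvAgo rest target_count final_mean acc pattern_index

def find_reasonable_low_intensity_pixels (intensity_values : List Int) (target_count : Int) (final_mean : Int) : List Int :=
  pvAgo (PySem.List.enumerate intensity_values) target_count final_mean [] 0

-- ===== PORT B =====
-- B's helper `_first_greater`: hand-written binary search (`while lo < hi`), ported as
-- well-founded recursion on hi - lo; cands[mid] with mid always in range → List.getD.
def pvFG (cands : List Int) (x : Int) (lo hi : Nat) : Nat :=
  if h : lo < hi then
    let mid := (lo + hi) / 2
    if cands.getD mid 0 ≤ x then pvFG cands x (mid + 1) hi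
    else pvFG cands x lo mid
  else lo
termination_by hi - lo
decreasing_by all_goals omega

-- B's `while len(result) != target_count` loop: fuel = len(candidates) bounds the number of
-- iterations (pos strictly increases each turn); result kept reversed ([-1] = head).
def pvBloop (cands : List Int) (target_count : Int) (result : List Int) (pos : Nat) : Nat → List Int
  | 0 => result.reverse
  | fuel + 1 =>
    if ((result.length : Int) = target_count) then result.reverse
    else
      let last := result.headD 0
      let pos' := pvFG cands (last + 16) (pos + 1) cands.length
      if pos' = cands.length ∨ cands.getD pos' 0 - last ≥ 100 then result.reverse
      else pvBloop cands target_count (cands.getD pos' 0 :: result) pos' fuel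

def find_reasonable_low_intensity_pixels_alt (intensity_values : List Int) (target_count : Int) (final_mean : Int) : List Int :=
  let candidates := (PySem.List.enumerate intensity_values).filterMap
    (fun p => if p.2 < final_mean then some p.1 else none)
  match candidates with
  | [] => []
  | c0 :: _ => pvBloop candidates target_count [c0] 0 candidates.length

-- ===== PRECONDITION & SPEC =====
def Spec_find_reasonable_low_intensity_pixels (intensity_values : List Int) (target_count : Int) (final_mean : Int) (out : List Int) : Prop := out = find_reasonable_low_intensity_pixels_alt intensity_values target_count final_mean
instance (intensity_values : List Int) (target_count : Int) (final_mean : Int) (out : List Int) : Decidable (Spec_find_reasonable_low_intensity_pixels intensity_values target_count final_mean out) := by unfold Spec_find_reasonable_low_intensity_pixels; infer_instance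

-- ===== CLAIM (what is proved, stated in full; the proofs are below) =====
def Claim_equal_find_reasonable_low_intensity_pixels : Prop := ∀ (intensity_values : List Int) (target_count : Int) (final_mean : Int), Dom_find_reasonable_low_intensity_pixels intensity_values target_count final_mean → Spec_find_reasonable_low_intensity_pixels intensity_values target_count final_mean (find_reasonable_low_intensity_pixels intensity_values target_count final_mean)

-- ===== LEMMAS AND PROOFS =====

-- Proof-only intermediate: the greedy linear pass over the candidate list with an explicit
-- last-selected value.  A is shown equal to it, and it is shown equal to B's jump loop.
def pvGreedy (cands : List Int) (target_count : Int) (res : List Int) (last_selected : Option Int) : List Int :=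
  match cands with
  | [] => res.reverse
  | c :: rest =>
    match last_selected with
    | none =>
      let res' := c :: res
      if ((res'.length : Int) = target_count) then res'.reverse
      else pvGreedy rest target_count res' (some c)
    | some l =>
      if 100 > c - l ∧ c - l > 16 then
        let res' := c :: res
        if ((res'.length : Int) = target_count) then res'.reverse
        else pvGreedy rest target_count res' (some c)
      else pvGreedy rest target_count res last_selected

-- Both distance_pattern entries are 16, so for any in-range pattern_index the looked-up bound is 16.
lemma pvPattern_val (p : Nat) (hp : p < 2) : ([(16 : Int), 16].getD p 0) = 16 := by
  interval_cases p <;> rfl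

-- A's fused scan equals the greedy pass over the filtered candidates,
-- provided the greedy last_selected is the head of A's (reversed) accumulator.
lemma pvAgo_eq_pvGreedy (pending : List (Int × Int)) (t f : Int) :
    ∀ (acc : List Int) (p : Nat), p < 2 →
      pvAgo pending t f acc p
        = pvGreedy (pending.filterMap (fun q => if q.2 < f then some q.1 else none)) t acc acc.head? := by
  induction pending with
  | nil => intro acc p _; simp [pvAgo, pvGreedy]
  | cons hd rest ih =>
    intro acc p hp
    obtain ⟨i, v⟩ := hd
    by_cases hv : v < f
    · cases acc with
      | nil =>
        simp only [pvAgo, pvGreedy, List.filterMap_cons, if_pos hv, List.head?]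
        split_ifs with ht
        · rfl
        · exact ih [i] ((p + 1) % 2) (Nat.mod_lt _ (by norm_num))
      | cons last acc' =>
        simp only [pvAgo, pvGreedy, List.filterMap_cons, if_pos hv, List.head?,
          pvPattern_val p hp]
        by_cases hc : 100 > i - last ∧ i - last > (16 : Int)
        · simp only [if_pos hc]
          split_ifs with ht
          · rfl
          · exact ih (i :: last :: acc') ((p + 1) % 2) (Nat.mod_lt _ (by norm_num))
        · simp only [if_neg hc]
          exact ih (last :: acc') p hp
    · simp only [pvAgo, List.filterMap_cons, if_neg hv]
      exact ih acc p hp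

-- Monotonicity of getD on a strictly sorted list.
lemma pvSorted_getD_mono {cands : List Int} (hs : cands.Pairwise (· < ·))
    {j k : Nat} (hjk : j ≤ k) (hk : k < cands.length) :
    cands.getD j 0 ≤ cands.getD k 0 := by
  rcases Nat.lt_or_ge j k with h | h
  · have hj : j < cands.length := lt_trans h hk
    rw [cands.getD_eq_getElem 0 hj, cands.getD_eq_getElem 0 hk]
    exact le_of_lt ((List.pairwise_iff_getElem.mp hs) j k hj hk h)
  · have : j = k := le_antisymm hjk h
    subst this; rfl

-- Binary-search correctness on a sorted list.
lemma pvFG_spec (cands : List Int) (x : Int) (hs : cands.Pairwise (· < ·)) :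
    ∀ lo hi, lo ≤ hi → hi ≤ cands.length →
      lo ≤ pvFG cands x lo hi ∧ pvFG cands x lo hi ≤ hi ∧
      (∀ j, lo ≤ j → j < pvFG cands x lo hi → cands.getD j 0 ≤ x) ∧
      (pvFG cands x lo hi < hi → x < cands.getD (pvFG cands x lo hi) 0) := by
  suffices h : ∀ n lo hi, hi - lo = n → lo ≤ hi → hi ≤ cands.length →
      lo ≤ pvFG cands x lo hi ∧ pvFG cands x lo hi ≤ hi ∧
      (∀ j, lo ≤ j → j < pvFG cands x lo hi → cands.getD j 0 ≤ x) ∧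
      (pvFG cands x lo hi < hi → x < cands.getD (pvFG cands x lo hi) 0) by
    intro lo hi
    exact h _ lo hi rfl
  intro n
  induction n using Nat.strong_induction_on with
  | _ n ih =>
  intro lo hi hn hlohi hhil
  rw [pvFG]
  by_cases h : lo < hi
  · simp only [dif_pos h]
    set mid := (lo + hi) / 2 with hmid
    have hmlo : lo ≤ mid := by omega
    have hmhi : mid < hi := by omega
    by_cases hcm : cands.getD mid 0 ≤ x
    · simp only [if_pos hcm]
      have hrec := ih (hi - (mid + 1)) (by omega) (mid + 1) hi rfl (by omega) hhil
      refine ⟨by omega, hrec.2.1, ?_, hrec.2.2.2⟩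
      intro j hj hjlt
      rcases Nat.lt_or_ge j (mid + 1) with hj' | hj'
      · exact le_trans (pvSorted_getD_mono hs (by omega) (by omega)) hcm
      · exact hrec.2.2.1 j hj' hjlt
    · simp only [if_neg hcm]
      have hrec := ih (mid - lo) (by omega) lo mid rfl hmlo (by omega)
      refine ⟨hrec.1, by omega, hrec.2.2.1, ?_⟩
      intro hlt
      rcases Nat.lt_or_ge (pvFG cands x lo mid) mid with h' | h'
      · exact hrec.2.2.2 h'
      · have heq : pvFG cands x lo mid = mid := le_antisymm hrec.2.1 h'
        rw [heq]; omega
  · simp only [dif_neg h]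
    exact ⟨le_refl _, by omega,
      fun j hj hjlt => absurd (lt_of_le_of_lt hj hjlt) (lt_irrefl _),
      fun hlt => absurd hlt h⟩

-- Greedy skips every element that fails the window condition.
lemma pvGreedy_skip (t : Int) (res : List Int) (l : Int) :
    ∀ seg rest, (∀ c ∈ seg, ¬(100 > c - l ∧ c - l > 16)) →
      pvGreedy (seg ++ rest) t res (some l) = pvGreedy rest t res (some l) := by
  intro seg
  induction seg with
  | nil => intro rest _; rfl
  | cons c cs ih =>
    intro rest hskip
    have hc : ¬(100 > c - l ∧ c - l > 16) := hskip c List.mem_cons_self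
    simp only [List.cons_append, pvGreedy, if_neg hc]
    exact ih rest (fun d hd => hskip d (List.mem_cons_of_mem _ hd))

-- Elements of a drop are getD values at later indices.
lemma pvMem_drop {cands : List Int} {n : Nat} {e : Int} (he : e ∈ cands.drop n) :
    ∃ j, n ≤ j ∧ j < cands.length ∧ e = cands.getD j 0 := by
  obtain ⟨j, hj, hget⟩ := List.mem_iff_getElem.mp he
  rw [List.length_drop] at hj
  refine ⟨n + j, by omega, by omega, ?_⟩
  rw [cands.getD_eq_getElem 0 (by omega)]
  rw [List.getElem_drop] at hget
  exact hget.symm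

-- Core invariant: the greedy pass over the unprocessed suffix equals B's jump loop.
lemma pvGreedy_eq_pvBloop (cands : List Int) (t : Int) (hs : cands.Pairwise (· < ·)) :
    ∀ fuel pos res last, res.head? = some last → ((res.length : Int) ≠ t) →
      cands.length ≤ pos + fuel → pos < cands.length →
      pvGreedy (cands.drop (pos + 1)) t res (some last)
        = pvBloop cands t res pos fuel := by
  intro fuel
  induction fuel with
  | zero =>
    intro pos res last _ _ hlen _
    rw [List.drop_eq_nil_of_le (by omega)]
    rfl
  | succ fuel ih =>
    intro pos res last hhead hlen hfuel hpos
    cases res with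
    | nil => exact absurd hhead (by simp)
    | cons a rs =>
    have ha : a = last := by simpa using hhead
    subst ha
    simp only [pvBloop, if_neg hlen, List.headD]
    set p' := pvFG cands (a + 16) (pos + 1) cands.length with hp'
    obtain ⟨hge, hle, hbelow, hat⟩ :=
      pvFG_spec cands (a + 16) hs (pos + 1) cands.length (by omega) (le_refl _)
    -- split the unprocessed suffix at p'
    have hsplit : cands.drop (pos + 1)
        = (cands.drop (pos + 1)).take (p' - (pos + 1)) ++ cands.drop p' := by
      conv_lhs => rw [← List.take_append_drop (p' - (pos + 1)) (cands.drop (pos + 1))]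
      rw [List.drop_drop, show pos + 1 + (p' - (pos + 1)) = p' from by omega]
    have hskipseg : ∀ c ∈ (cands.drop (pos + 1)).take (p' - (pos + 1)),
        ¬(100 > c - a ∧ c - a > 16) := by
      intro c hc
      obtain ⟨jj, hjj, hcget⟩ := List.mem_iff_getElem.mp hc
      have hjjb : jj < p' - (pos + 1) ∧ pos + 1 + jj < cands.length := by
        rw [List.length_take, List.length_drop] at hjj
        omega
      rw [List.getElem_take, List.getElem_drop] at hcget
      have hval : c ≤ a + 16 := by
        have hb := hbelow (pos + 1 + jj) (by omega) (by omega)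
        rw [cands.getD_eq_getElem 0 (by omega)] at hb
        rw [← hcget]
        exact hb
      intro hcond
      omega
    by_cases hdone : p' = cands.length ∨ cands.getD p' 0 - a ≥ 100
    · simp only [if_pos hdone]
      rw [hsplit, pvGreedy_skip t (a :: rs) a _ _ hskipseg]
      by_cases hp'len : p' = cands.length
      · rw [hp'len, List.drop_length]
        rfl
      · have hp'lt : p' < cands.length := lt_of_le_of_ne hle hp'len
        have hfar : cands.getD p' 0 - a ≥ 100 := hdone.resolve_left hp'len
        have hskipall : ∀ c ∈ cands.drop p', ¬(100 > c - a ∧ c - a > 16) := by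
          intro c hc
          obtain ⟨j, hj1, hj2, rfl⟩ := pvMem_drop hc
          have hmono : cands.getD p' 0 ≤ cands.getD j 0 := pvSorted_getD_mono hs hj1 hj2
          intro hcond
          omega
        rw [← List.append_nil (cands.drop p'), pvGreedy_skip t (a :: rs) a _ _ hskipall]
        rfl
    · simp only [if_neg hdone]
      simp only [not_or, not_le] at hdone
      obtain ⟨hp'len, hnear⟩ := hdone
      have hp'lt : p' < cands.length := lt_of_le_of_ne hle hp'len
      set c := cands.getD p' 0 with hc
      have hcgt : a + 16 < c := hat hp'lt
      have hdropc : cands.drop p' = c :: cands.drop (p' + 1) := by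
        rw [hc, cands.getD_eq_getElem 0 hp'lt]
        exact List.drop_eq_getElem_cons hp'lt
      rw [hsplit, pvGreedy_skip t (a :: rs) a _ _ hskipseg, hdropc]
      have hcond : 100 > c - a ∧ c - a > 16 := ⟨by omega, by omega⟩
      simp only [pvGreedy, if_pos hcond]
      by_cases ht : ((c :: a :: rs).length : Int) = t
      · simp only [if_pos ht]
        cases fuel with
        | zero =>
          exfalso
          have h1 : pos + 1 ≤ p' := hge
          have h2 : p' < cands.length := hp'lt
          omega
        | succ fuel' => simp only [pvBloop, if_pos ht]
      · simp only [if_neg ht]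
        exact ih p' (c :: a :: rs) c rfl ht (by omega) hp'lt

-- ===== VERDICT (by name: the statement is the Claim_ definition above) =====
theorem find_reasonable_low_intensity_pixels_spec : Claim_equal_find_reasonable_low_intensity_pixels := by
  intro intensity_values target_count final_mean _
  unfold Spec_find_reasonable_low_intensity_pixels
  unfold find_reasonable_low_intensity_pixels find_reasonable_low_intensity_pixels_alt
  rw [pvAgo_eq_pvGreedy _ _ _ [] 0 (by norm_num)]
  set cands := (PySem.List.enumerate intensity_values).filterMap
    (fun p => if p.2 < final_mean then some p.1 else none) with hcands
  have hs : cands.Pairwise (· < ·) := by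
    rw [hcands]
    refine List.Pairwise.filterMap _ ?_ (PySem.List.pairwise_lt_enumerate _ _)
    intro a b hab x hx y hy
    
    split_ifs at hx hy
    simp_all
  cases hcl : cands with
  | nil => simp [pvGreedy]
  | cons c0 rest =>
    simp only [List.head?]
    show pvGreedy (c0 :: rest) target_count [] none = pvBloop (c0 :: rest) target_count [c0] 0 (c0 :: rest).length
    by_cases ht : ((1 : Int) = target_count)
    · simp only [pvGreedy, List.length_cons, List.length_nil]
      rw [if_pos (by exact_mod_cast ht)]
      cases hl : (c0 :: rest).length with
      | zero => simp at hl
      | succ m =>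
        simp only [pvBloop]
        rw [if_pos (by simp; exact_mod_cast ht)]
    · simp only [pvGreedy, List.length_cons, List.length_nil]
      rw [if_neg (by exact_mod_cast ht)]
      have := pvGreedy_eq_pvBloop (c0 :: rest) target_count (hcl ▸ hs) (c0 :: rest).length 0 [c0] c0 rfl (by simpa using ht) (by omega) (by simp)
      simpa using this
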